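-- pv_equiv track=rewrite | github.com/BarnabusXzer/CompMethods | Quiz1/prob1.py | SumTermProductNotEqual
-- ===== SOURCE A (Python) =====
-- def SumTermProductNotEqual(array1, array2):
--
--     response = 0
--     for i in range(len(array1)):
--         x = array1[i]
--         y = array2[i]
--         if x == y:
--             pass
--         else:
--             response = response + x * y
--     return response
-- ===== SOURCE B (Python) =====
-- def SumTermProductNotEqual(array1, array2):
--     total = 0
--     equal = 0
--     for i in range(len(array1)):
--         p = array1[i] * array2[i]
--         total = total + p
--         if array1[i] == array2[i]:
--             equal = equal + p
--     return total - equal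
-- ===== Notes on version B (the rewrite author's own statement) =====
-- stated objective: alternative
-- what changed: B reformulates 'sum of products where entries differ' as 'sum of all products minus sum of products at equal entries', accumulating the two unconditional/conditional totals and subtracting, instead of A's single guarded accumulator.
-- outside the precondition, e.g. on SumTermProductNotEqual([1, 2], [5]): A raises IndexError, B raises IndexError
import Mathlib
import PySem

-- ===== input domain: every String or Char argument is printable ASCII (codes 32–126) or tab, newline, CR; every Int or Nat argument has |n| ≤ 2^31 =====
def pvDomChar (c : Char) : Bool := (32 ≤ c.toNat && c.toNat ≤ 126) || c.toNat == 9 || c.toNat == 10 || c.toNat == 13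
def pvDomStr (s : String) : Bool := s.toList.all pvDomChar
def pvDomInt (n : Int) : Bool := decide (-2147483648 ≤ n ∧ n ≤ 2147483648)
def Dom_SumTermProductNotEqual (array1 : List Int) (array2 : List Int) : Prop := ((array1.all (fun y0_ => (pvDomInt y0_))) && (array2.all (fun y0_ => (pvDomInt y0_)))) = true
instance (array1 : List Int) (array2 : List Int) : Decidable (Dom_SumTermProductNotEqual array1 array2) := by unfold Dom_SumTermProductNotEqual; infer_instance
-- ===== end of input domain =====

-- B computes the same sum-where-unequal as total-of-all-products minus total-at-equal-entries (alternative decomposition, same cost).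
-- Pre_ excludes inputs where array2 is shorter than array1, on which A raises IndexError (B raises there too).


-- ===== PORT A =====
def SumTermProductNotEqual (array1 : List Int) (array2 : List Int) : Int :=
  (PySem.List.pyRange 0 array1.length 1).foldl (fun response i =>
    let x := (PySem.List.pyGet? array1 i).getD 0
    let y := (PySem.List.pyGet? array2 i).getD 0
    if x == y then response else response + x * y) 0

-- ===== PORT B =====
def SumTermProductNotEqual_alt (array1 : List Int) (array2 : List Int) : Int :=
  let st := (PySem.List.pyRange 0 array1.length 1).foldl (fun (te : Int × Int) i =>
    let p := (PySem.List.pyGet? array1 i).getD 0 * (PySem.List.pyGet? array2 i).getD 0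
    let total := te.1 + p
    let equal := if (PySem.List.pyGet? array1 i).getD 0 == (PySem.List.pyGet? array2 i).getD 0
                 then te.2 + p else te.2
    (total, equal)) (0, 0)
  st.1 - st.2

-- ===== PRECONDITION & SPEC =====
-- Pre_ excludes inputs where array2 is shorter than array1: there A raises IndexError (and B raises too).
def Pre_SumTermProductNotEqual (array1 : List Int) (array2 : List Int) : Prop :=
  array1.length ≤ array2.length
instance (array1 : List Int) (array2 : List Int) : Decidable (Pre_SumTermProductNotEqual array1 array2) := by unfold Pre_SumTermProductNotEqual; infer_instance
def pvWitness_SumTermProductNotEqual : List Int × List Int := ([1, 2, 3], [1, -4, 3])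

def Spec_SumTermProductNotEqual (array1 : List Int) (array2 : List Int) (out : Int) : Prop := out = SumTermProductNotEqual_alt array1 array2
instance (array1 : List Int) (array2 : List Int) (out : Int) : Decidable (Spec_SumTermProductNotEqual array1 array2 out) := by unfold Spec_SumTermProductNotEqual; infer_instance

-- ===== CLAIM (what is proved, stated in full; the proofs are below) =====
def Claim_equal_SumTermProductNotEqual : Prop := ∀ (array1 : List Int) (array2 : List Int), Dom_SumTermProductNotEqual array1 array2 → Pre_SumTermProductNotEqual array1 array2 → Spec_SumTermProductNotEqual array1 array2 (SumTermProductNotEqual array1 array2)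

-- ===== LEMMAS AND PROOFS =====

def pvStepA (array1 array2 : List Int) : Int → Int → Int := fun response i =>
  let x := (PySem.List.pyGet? array1 i).getD 0
  let y := (PySem.List.pyGet? array2 i).getD 0
  if x == y then response else response + x * y

def pvStepB (array1 array2 : List Int) : Int × Int → Int → Int × Int := fun te i =>
  let p := (PySem.List.pyGet? array1 i).getD 0 * (PySem.List.pyGet? array2 i).getD 0
  let total := te.1 + p
  let equal := if (PySem.List.pyGet? array1 i).getD 0 == (PySem.List.pyGet? array2 i).getD 0
               then te.2 + p else te.2
  (total, equal)

theorem pvA_eq (array1 array2 : List Int) :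
    SumTermProductNotEqual array1 array2
      = (PySem.List.pyRange 0 array1.length 1).foldl (pvStepA array1 array2) 0 := rfl

theorem pvB_eq (array1 array2 : List Int) :
    SumTermProductNotEqual_alt array1 array2
      = (let st := (PySem.List.pyRange 0 array1.length 1).foldl (pvStepB array1 array2) (0, 0)
         st.1 - st.2) := rfl

-- shifting the pair accumulator out of B's fold
theorem pvStepA_app (array1 array2 : List Int) (r i : Int) :
    pvStepA array1 array2 r i
      = if ((PySem.List.pyGet? array1 i).getD 0 == (PySem.List.pyGet? array2 i).getD 0)
        then r
        else r + (PySem.List.pyGet? array1 i).getD 0 * (PySem.List.pyGet? array2 i).getD 0 := rfl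

theorem pvStepB_app (array1 array2 : List Int) (te : Int × Int) (i : Int) :
    pvStepB array1 array2 te i
      = (te.1 + (PySem.List.pyGet? array1 i).getD 0 * (PySem.List.pyGet? array2 i).getD 0,
         if ((PySem.List.pyGet? array1 i).getD 0 == (PySem.List.pyGet? array2 i).getD 0)
         then te.2 + (PySem.List.pyGet? array1 i).getD 0 * (PySem.List.pyGet? array2 i).getD 0
         else te.2) := rfl

theorem pvB_shift (array1 array2 : List Int) (l : List Int) (t e : Int) :
    l.foldl (pvStepB array1 array2) (t, e)
      = ((l.foldl (pvStepB array1 array2) (0, 0)).1 + t,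
         (l.foldl (pvStepB array1 array2) (0, 0)).2 + e) := by
  induction l generalizing t e with
  | nil => simp
  | cons a l ih =>
    rw [List.foldl_cons, List.foldl_cons, pvStepB_app, pvStepB_app]
    by_cases h : ((PySem.List.pyGet? array1 a).getD 0 == (PySem.List.pyGet? array2 a).getD 0)
    · rw [if_pos h, if_pos h]
      conv_rhs => rw [ih]
      conv_lhs => rw [ih]
      exact Prod.ext (by ring) (by ring)
    · rw [if_neg h, if_neg h]
      conv_rhs => rw [ih]
      conv_lhs => rw [ih]
      exact Prod.ext (by ring) (by ring)

-- A's fold equals total minus equal of B's fold, over any index list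
theorem pv_fold_rel (array1 array2 : List Int) (l : List Int) (r : Int) :
    l.foldl (pvStepA array1 array2) r
      = r + (l.foldl (pvStepB array1 array2) (0, 0)).1
          - (l.foldl (pvStepB array1 array2) (0, 0)).2 := by
  induction l generalizing r with
  | nil => simp
  | cons a l ih =>
    rw [List.foldl_cons, List.foldl_cons, pvStepA_app, pvStepB_app]
    by_cases h : ((PySem.List.pyGet? array1 a).getD 0 == (PySem.List.pyGet? array2 a).getD 0)
    · conv_rhs => rw [pvB_shift]
      rw [if_pos h, if_pos h, ih]; ring
    · conv_rhs => rw [pvB_shift]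
      rw [if_neg h, if_neg h, ih]; ring

-- ===== VERDICT (by name: the statement is the Claim_ definition above) =====
theorem SumTermProductNotEqual_spec : Claim_equal_SumTermProductNotEqual := by
  intro a1 a2 _ _
  unfold Spec_SumTermProductNotEqual
  rw [pvA_eq, pvB_eq, pv_fold_rel]
  ring
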